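-- pv_equiv track=rewrite | github.com/SeungAhSon/Baekjoon | 프로그래머스/0/120866. 안전지대/안전지대.py | solution
-- ===== SOURCE A (Python) =====
-- def solution(board):
--     answer = 0
--     for i in range(len(board)):
--         for j in range(len(board)):
--             temp = board[i][j]
--             if i!=0 and j!=0: temp += board[i-1][j-1]
--             if i!=0: temp += board[i-1][j]
--             if i!=0 and j!=len(board)-1 : temp+=board[i-1][j+1]
--             if i!=len(board)-1 : temp+=board[i+1][j]
--
--             if j!=0: temp+=board[i][j-1]
--             if j!=len(board)-1 : temp += board[i][j+1]
--             if i!=len(board)-1 and j!=0: temp += board[i+1][j-1]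
--             if i!=len(board)-1 and j!=len(board)-1: temp += board[i+1][j+1]
--             if temp==0:
--                 answer+=1
--     return answer
-- ===== SOURCE B (Python) =====
-- def solution(board):
--     n = len(board)
--     # 2D prefix sums: P[r][c] = sum of board[x][y] for x<r, y<c (first n columns)
--     P = [[0] * (n + 1)]
--     for i in range(n):
--         prev = P[i]
--         cur = [0]
--         for j in range(n):
--             cur.append(board[i][j] + prev[j + 1] + cur[j] - prev[j])
--         P.append(cur)
--     answer = 0
--     for i in range(n):
--         for j in range(n):
--             r0 = max(i - 1, 0); r1 = min(i + 1, n - 1)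
--             c0 = max(j - 1, 0); c1 = min(j + 1, n - 1)
--             if P[r1 + 1][c1 + 1] - P[r0][c1 + 1] - P[r1 + 1][c0] + P[r0][c0] == 0:
--                 answer += 1
--     return answer
-- ===== Notes on version B (the rewrite author's own statement) =====
-- stated objective: alternative
-- what changed: Replaces the per-cell 8-branch neighbor accumulation with a 2D prefix-sum table queried once per cell via inclusion-exclusion with clamped window bounds.
import Mathlib
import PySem

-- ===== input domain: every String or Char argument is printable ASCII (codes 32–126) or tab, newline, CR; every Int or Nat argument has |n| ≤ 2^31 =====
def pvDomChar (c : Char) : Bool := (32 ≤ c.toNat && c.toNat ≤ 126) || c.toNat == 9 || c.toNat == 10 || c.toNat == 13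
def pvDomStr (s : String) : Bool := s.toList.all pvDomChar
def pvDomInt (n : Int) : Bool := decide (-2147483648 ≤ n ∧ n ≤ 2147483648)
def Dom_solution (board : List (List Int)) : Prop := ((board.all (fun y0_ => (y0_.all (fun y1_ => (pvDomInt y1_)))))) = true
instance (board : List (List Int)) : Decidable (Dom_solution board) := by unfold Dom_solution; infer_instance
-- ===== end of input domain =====

-- B replaces A's per-cell 8-branch neighbor accumulation with a 2D prefix-sum table
-- queried once per cell via inclusion-exclusion (alternative algorithm, same O(n^2)).


-- ===== PORT A =====
-- board[i][j] as a total read (Python raises exactly where Pre_solution fails)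
def pvAGet (board : List (List Int)) (i j : Int) : Int :=
  PySem.List.pyGetD (PySem.List.pyGetD board i []) j 0

def solution (board : List (List Int)) : Int :=
  (PySem.List.pyRange 0 (board.length : Int) 1).foldl (fun answer i =>
    (PySem.List.pyRange 0 (board.length : Int) 1).foldl (fun answer j =>
      let temp := pvAGet board i j
      let temp := if i ≠ 0 ∧ j ≠ 0 then temp + pvAGet board (i-1) (j-1) else temp
      let temp := if i ≠ 0 then temp + pvAGet board (i-1) j else temp
      let temp := if i ≠ 0 ∧ j ≠ (board.length : Int) - 1 then temp + pvAGet board (i-1) (j+1) else temp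
      let temp := if i ≠ (board.length : Int) - 1 then temp + pvAGet board (i+1) j else temp
      let temp := if j ≠ 0 then temp + pvAGet board i (j-1) else temp
      let temp := if j ≠ (board.length : Int) - 1 then temp + pvAGet board i (j+1) else temp
      let temp := if i ≠ (board.length : Int) - 1 ∧ j ≠ 0 then temp + pvAGet board (i+1) (j-1) else temp
      let temp := if i ≠ (board.length : Int) - 1 ∧ j ≠ (board.length : Int) - 1 then temp + pvAGet board (i+1) (j+1) else temp
      if temp = 0 then answer + 1 else answer) answer) 0

-- ===== PORT B =====
-- one prefix row: cur grows by cur.append(board[i][j] + prev[j+1] + cur[j] - prev[j])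
def pvAltRow (row prev : List Int) (n : Nat) : List Int :=
  (List.range n).foldl (fun cur j =>
    cur ++ [row.getD j 0 + prev.getD (j+1) 0 + cur.getD j 0 - prev.getD j 0]) [0]

-- the table P: starts as [[0]*(n+1)], appends one prefix row per board row (prev = P[i])
def pvAltTable (board : List (List Int)) (n : Nat) : List (List Int) :=
  (List.range n).foldl (fun P i => P ++ [pvAltRow (board.getD i []) (P.getD i []) n])
    [List.replicate (n+1) 0]

def solution_alt (board : List (List Int)) : Int :=
  let n := board.length
  let P := pvAltTable board n
  (List.range n).foldl (fun answer i =>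
    (List.range n).foldl (fun answer j =>
      let r0 := i - 1          -- max(i-1,0): Nat subtraction clamps at 0
      let r1 := min (i+1) (n-1)
      let c0 := j - 1          -- max(j-1,0)
      let c1 := min (j+1) (n-1)
      if (P.getD (r1+1) []).getD (c1+1) 0 - (P.getD r0 []).getD (c1+1) 0
         - (P.getD (r1+1) []).getD c0 0 + (P.getD r0 []).getD c0 0 = 0
      then answer + 1 else answer) answer) 0

-- ===== PRECONDITION & SPEC =====
-- Pre_: Python A indexes board[i][j] for all i, j < len(board); it raises IndexError
-- exactly when some row is shorter than the board, so those inputs are excluded.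
def Pre_solution (board : List (List Int)) : Prop := ∀ row ∈ board, board.length ≤ row.length
instance (board : List (List Int)) : Decidable (Pre_solution board) := by unfold Pre_solution; infer_instance
def pvWitness_solution : List (List Int) := [[0, 1], [1, 0]]

def Spec_solution (board : List (List Int)) (out : Int) : Prop := out = solution_alt board
instance (board : List (List Int)) (out : Int) : Decidable (Spec_solution board out) := by unfold Spec_solution; infer_instance

-- ===== CLAIM (what is proved, stated in full; the proofs are below) =====
def Claim_equal_solution : Prop := ∀ (board : List (List Int)), Dom_solution board → Pre_solution board → Spec_solution board (solution board)

-- ===== LEMMAS AND PROOFS =====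

-- board[i][j] with Nat indices and default 0 (the proofs' atomic cell read)
def pvE (board : List (List Int)) (i j : Nat) : Int := (board.getD i []).getD j 0

-- prefix sum of one row: pvRP row c = row[0] + … + row[c-1] (getD-read)
def pvRP (row : List Int) : Nat → Int
  | 0 => 0
  | c+1 => pvRP row c + row.getD c 0

-- 2D prefix sum: sum over x < r of pvRP (board[x]) c
def pvSP (board : List (List Int)) (r c : Nat) : Int :=
  ((board.take r).map (fun row => pvRP row c)).sum

lemma pvRP_zero (row : List Int) : pvRP row 0 = 0 := rfl
lemma pvRP_succ (row : List Int) (c : Nat) : pvRP row (c+1) = pvRP row c + row.getD c 0 := rfl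

lemma pvSP_zero (board : List (List Int)) (r : Nat) : pvSP board r 0 = 0 := by
  simp [pvSP, pvRP]

lemma pvSP_succ (board : List (List Int)) (r c : Nat) (h : r < board.length) :
    pvSP board (r+1) c = pvSP board r c + pvRP (board.getD r []) c := by
  have ht : board.take (r+1) = board.take r ++ [board.getD r []] := by
    rw [List.take_add_one, List.getElem?_eq_getElem h]
    simp [List.getD_eq_getElem?_getD, List.getElem?_eq_getElem h]
  simp [pvSP, ht]

lemma pvAltRow_spec (row prev : List Int) (n : Nat) :
    pvAltRow row prev n =
      (List.range (n+1)).map (fun c => prev.getD c 0 + pvRP row c - prev.getD 0 0) := by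
  induction n with
  | zero => simp [pvAltRow, pvRP]
  | succ n ih =>
    unfold pvAltRow at ih ⊢
    rw [List.range_succ, List.foldl_append, ih]
    simp only [List.foldl_cons, List.foldl_nil]
    rw [PySem.List.getD_map_range _ _ _ _ (by omega)]
    rw [show List.range (n+1+1) = List.range (n+1) ++ [n+1] from List.range_succ, List.map_append]
    simp only [List.map_cons, List.map_nil, List.append_cancel_left_eq, List.cons.injEq, and_true]
    rw [pvRP_succ]
    ring

lemma pvAltTable_spec (board : List (List Int)) :
    pvAltTable board board.length =
      (List.range (board.length+1)).map (fun r =>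
        (List.range (board.length+1)).map (fun c => pvSP board r c)) := by
  unfold pvAltTable
  have aux : ∀ m, m ≤ board.length →
      (List.range m).foldl (fun P i => P ++ [pvAltRow (board.getD i []) (P.getD i []) board.length])
        [List.replicate (board.length+1) 0] =
      (List.range (m+1)).map (fun r => (List.range (board.length+1)).map (fun c => pvSP board r c)) := by
    intro m
    induction m with
    | zero =>
      intro _
      simp only [zero_add, List.range_one, List.map_cons, List.map_nil, List.cons.injEq,
        List.range_zero, List.foldl_nil, and_true]
      symm
      rw [List.eq_replicate_iff]
      constructor
      · simp
      · intro b hb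
        simp only [List.mem_map] at hb
        obtain ⟨c, _, rfl⟩ := hb
        simp [pvSP]
    | succ m ih =>
      intro hm
      rw [List.range_succ, List.foldl_append, ih (by omega)]
      simp only [List.foldl_cons, List.foldl_nil]
      rw [PySem.List.getD_map_range _ _ _ _ (by omega)]
      rw [pvAltRow_spec]
      have hrow : (List.range (board.length+1)).map (fun c =>
          ((List.range (board.length+1)).map (fun c => pvSP board m c)).getD c 0
            + pvRP (board.getD m []) c
            - ((List.range (board.length+1)).map (fun c => pvSP board m c)).getD 0 0) =
          (List.range (board.length+1)).map (fun c => pvSP board (m+1) c) := by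
        apply List.map_congr_left
        intro c hc
        rw [PySem.List.getD_map_range _ _ _ _ (by simpa using List.mem_range.mp hc),
            PySem.List.getD_map_range _ _ _ _ (by omega),
            pvSP_succ board m c (by omega), pvSP_zero]
        ring
      rw [hrow]
      rw [show List.range (m+1+1) = List.range (m+1) ++ [m+1] from List.range_succ, List.map_append]
      simp
  exact aux board.length le_rfl

lemma pvTable_read (board : List (List Int)) (r c : Nat)
    (hr : r ≤ board.length) (hc : c ≤ board.length) :
    ((pvAltTable board board.length).getD r []).getD c 0 = pvSP board r c := by
  rw [pvAltTable_spec, PySem.List.getD_map_range _ _ _ _ (by omega),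
      PySem.List.getD_map_range _ _ _ _ (by omega)]

lemma pvRP_window (row : List Int) (j n : Nat) (hj : j < n) :
    pvRP row (min (j+1) (n-1) + 1) - pvRP row (j-1) =
      (if ¬ j = 0 then row.getD (j-1) 0 else 0) + row.getD j 0
        + (if ¬ j = n-1 then row.getD (j+1) 0 else 0) := by
  by_cases h0 : j = 0 <;> by_cases h1 : j = n-1
  · subst h0
    have hn : n - 1 = 0 := h1.symm
    have hm : min (0+1) (n-1) + 1 = 0+1 := by omega
    rw [hm]
    simp [hn, pvRP_succ, pvRP_zero]
  · subst h0
    have hm : min (0+1) (n-1) + 1 = 0+1+1 := by omega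
    rw [hm]
    simp [h1, pvRP_succ, pvRP_zero]
  · obtain ⟨k, rfl⟩ : ∃ k, j = k+1 := ⟨j-1, by omega⟩
    have hn : n - 1 = k+1 := h1.symm
    have hm : min (k+1+1) (n-1) + 1 = k+1+1 := by omega
    rw [hm]
    simp [hn, pvRP_succ]
    ring
  · obtain ⟨k, rfl⟩ : ∃ k, j = k+1 := ⟨j-1, by omega⟩
    have hm : min (k+1+1) (n-1) + 1 = k+1+1+1 := by omega
    rw [hm]
    simp [h1, pvRP_succ]
    ring

lemma pvSP_window (board : List (List Int)) (i c : Nat) (hi : i < board.length) :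
    pvSP board (min (i+1) (board.length-1) + 1) c - pvSP board (i-1) c =
      (if ¬ i = 0 then pvRP (board.getD (i-1) []) c else 0) + pvRP (board.getD i []) c
        + (if ¬ i = board.length-1 then pvRP (board.getD (i+1) []) c else 0) := by
  have hz : pvSP board 0 c = 0 := rfl
  by_cases h0 : i = 0 <;> by_cases h1 : i = board.length-1
  · subst h0
    have hn : board.length - 1 = 0 := h1.symm
    have hm : min (0+1) (board.length-1) + 1 = 0+1 := by omega
    have e1 := pvSP_succ board 0 c (by omega)
    rw [hm]
    simp [hn, e1, hz]
  · subst h0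
    have hm : min (0+1) (board.length-1) + 1 = 0+1+1 := by omega
    have e1 := pvSP_succ board 0 c (by omega)
    have e2 := pvSP_succ board (0+1) c (by omega)
    rw [hm]
    simp [h1, e2, e1, hz]
  · obtain ⟨k, rfl⟩ : ∃ k, i = k+1 := ⟨i-1, by omega⟩
    have hn : board.length - 1 = k+1 := h1.symm
    have hm : min (k+1+1) (board.length-1) + 1 = k+1+1 := by omega
    have e1 := pvSP_succ board k c (by omega)
    have e2 := pvSP_succ board (k+1) c (by omega)
    rw [hm]
    simp [hn, e2, e1]
    ring
  · obtain ⟨k, rfl⟩ : ∃ k, i = k+1 := ⟨i-1, by omega⟩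
    have hm : min (k+1+1) (board.length-1) + 1 = k+1+1+1 := by omega
    have e1 := pvSP_succ board k c (by omega)
    have e2 := pvSP_succ board (k+1) c (by omega)
    have e3 := pvSP_succ board (k+1+1) c (by omega)
    rw [hm]
    simp [h1, e3, e2, e1]
    ring

lemma addIf (c : Prop) [Decidable c] (t x : Int) :
    (if c then t + x else t) = t + (if c then x else 0) := by
  split_ifs <;> ring

lemma guardTerm (board : List (List Int)) (P : Prop) [Decidable P] (a b : Int) (a' b' : Nat)
    (hP : P → a = (a' : Int) ∧ b = (b' : Int)) :
    (if P then pvAGet board a b else 0) = (if P then pvE board a' b' else 0) := by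
  split_ifs with h
  · obtain ⟨ha, hb⟩ := hP h
    simp [ha, hb, pvAGet, pvE, PySem.List.pyGetD_natCast]
  · rfl

set_option maxHeartbeats 3200000 in
lemma ports_eq (board : List (List Int)) : solution board = solution_alt board := by
  simp only [solution, solution_alt]
  simp only [PySem.List.pyRange_one, sub_zero, zero_add, Int.toNat_natCast, List.foldl_map]
  apply PySem.List.foldl_congr_mem
  intro acc i hi
  apply PySem.List.foldl_congr_mem
  intro acc2 j hj
  have hi' : i < board.length := List.mem_range.mp hi
  have hj' : j < board.length := List.mem_range.mp hj
  rw [pvTable_read _ _ _ (by omega) (by omega), pvTable_read _ _ _ (by omega) (by omega),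
      pvTable_read _ _ _ (by omega) (by omega), pvTable_read _ _ _ (by omega) (by omega)]
  have hL : ((board.length : Int)) - 1 = ((board.length - 1 : Nat) : Int) := by omega
  simp only [addIf, hL, ne_eq, Nat.cast_inj, Nat.cast_eq_zero]
  rw [guardTerm board (¬i = 0 ∧ ¬j = 0) (↑i-1) (↑j-1) (i-1) (j-1)
        (by rintro ⟨a, b⟩; constructor <;> omega),
      guardTerm board (¬i = 0) (↑i-1) (↑j) (i-1) j
        (by intro a; constructor <;> omega),
      guardTerm board (¬i = 0 ∧ ¬j = board.length - 1) (↑i-1) (↑j+1) (i-1) (j+1)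
        (by rintro ⟨a, b⟩; constructor <;> omega),
      guardTerm board (¬i = board.length - 1) (↑i+1) (↑j) (i+1) j
        (by intro a; constructor <;> omega),
      guardTerm board (¬j = 0) (↑i) (↑j-1) i (j-1)
        (by intro a; constructor <;> omega),
      guardTerm board (¬j = board.length - 1) (↑i) (↑j+1) i (j+1)
        (by intro a; constructor <;> omega),
      guardTerm board (¬i = board.length - 1 ∧ ¬j = 0) (↑i+1) (↑j-1) (i+1) (j-1)
        (by rintro ⟨a, b⟩; constructor <;> omega),
      guardTerm board (¬i = board.length - 1 ∧ ¬j = board.length - 1) (↑i+1) (↑j+1) (i+1) (j+1)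
        (by rintro ⟨a, b⟩; constructor <;> omega)]
  have hc : pvAGet board ↑i ↑j = pvE board i j := by
    simp [pvAGet, pvE, PySem.List.pyGetD_natCast]
  rw [hc]
  have A1 := pvSP_window board i (min (j+1) (board.length-1) + 1) hi'
  have A2 := pvSP_window board i (j-1) hi'
  have W1 := pvRP_window (board.getD (i-1) []) j board.length hj'
  have W2 := pvRP_window (board.getD i []) j board.length hj'
  have W3 := pvRP_window (board.getD (i+1) []) j board.length hj'
  have key : pvE board i j
      + (if ¬i = 0 ∧ ¬j = 0 then pvE board (i-1) (j-1) else 0)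
      + (if ¬i = 0 then pvE board (i-1) j else 0)
      + (if ¬i = 0 ∧ ¬j = board.length - 1 then pvE board (i-1) (j+1) else 0)
      + (if ¬i = board.length - 1 then pvE board (i+1) j else 0)
      + (if ¬j = 0 then pvE board i (j-1) else 0)
      + (if ¬j = board.length - 1 then pvE board i (j+1) else 0)
      + (if ¬i = board.length - 1 ∧ ¬j = 0 then pvE board (i+1) (j-1) else 0)
      + (if ¬i = board.length - 1 ∧ ¬j = board.length - 1 then pvE board (i+1) (j+1) else 0)
      = pvSP board (min (i+1) (board.length-1) + 1) (min (j+1) (board.length-1) + 1)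
        - pvSP board (i-1) (min (j+1) (board.length-1) + 1)
        - pvSP board (min (i+1) (board.length-1) + 1) (j-1)
        + pvSP board (i-1) (j-1) := by
    by_cases b1 : i = 0 <;> by_cases b2 : i = board.length - 1 <;>
      by_cases b3 : j = 0 <;> by_cases b4 : j = board.length - 1 <;>
      simp [b1, b2, b3, b4, pvE] at A1 A2 W1 W2 W3 ⊢ <;>
      (try split_ifs at A1 A2 W1 W2 W3 ⊢) <;>
      omega
  rw [key]

-- ===== VERDICT (by name: the statement is the Claim_ definition above) =====
theorem solution_spec : Claim_equal_solution := by
  intro board _ _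
  unfold Spec_solution
  exact ports_eq board
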